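-- pv_equiv track=rewrite | github.com/hockeyjudson/Bootstrapping | pattern_extract.py | element_counter
-- ===== SOURCE A (Python) =====
-- def element_counter(sd,c,tag):
--     dt={}
--     for i in sd:
--         dt[i]={}
--     for i in sd:
--         dt[i]["x"]=0
--         dt[i]["y"]=0
--         for j in c.keys():
--             if j==tag:
--                 if i not in c[j]:
--                     dt[i]["x"]=0
--                 else:
--                     dt[i]["x"]=c[j][i]
--             else:
--                 if i not in c[j]:
--                     dt[i]["y"]=dt[i]["y"]+0
--                 else:
--                     dt[i]["y"]=dt[i]["y"]+c[j][i]
--     return dt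
-- ===== SOURCE B (Python) =====
-- def element_counter(sd, c, tag):
--     keys = set(sd)
--     x = {}
--     y = {}
--     for j, inner in c.items():
--         if j == tag:
--             for i, v in inner.items():
--                 if i in keys:
--                     x[i] = v
--         else:
--             for i, v in inner.items():
--                 if i in keys:
--                     y[i] = y.get(i, 0) + v
--     return {i: {"x": x.get(i, 0), "y": y.get(i, 0)} for i in dict.fromkeys(sd)}
-- ===== Notes on version B (the rewrite author's own statement) =====
-- stated objective: faster
-- what changed: Instead of scanning every category dict for every element of sd (per-element membership test and lookup in each category), B makes one pass over the actual entries of each category, accumulating the tag value and the other-category sum into two dicts keyed by element, then assembles the result for the deduplicated sd.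
import Mathlib
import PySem

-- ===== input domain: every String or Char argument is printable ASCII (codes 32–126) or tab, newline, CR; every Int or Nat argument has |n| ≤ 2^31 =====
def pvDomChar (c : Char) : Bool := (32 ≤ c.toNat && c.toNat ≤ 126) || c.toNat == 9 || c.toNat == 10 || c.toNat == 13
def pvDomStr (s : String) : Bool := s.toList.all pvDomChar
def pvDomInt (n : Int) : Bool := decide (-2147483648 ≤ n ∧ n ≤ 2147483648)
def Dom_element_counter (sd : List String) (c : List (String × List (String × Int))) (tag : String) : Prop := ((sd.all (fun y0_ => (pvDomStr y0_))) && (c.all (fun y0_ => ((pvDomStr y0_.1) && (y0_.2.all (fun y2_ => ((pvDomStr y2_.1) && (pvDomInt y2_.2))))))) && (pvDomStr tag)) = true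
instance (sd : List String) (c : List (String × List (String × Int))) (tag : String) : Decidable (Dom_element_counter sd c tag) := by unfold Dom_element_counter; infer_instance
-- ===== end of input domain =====

-- B replaces A's per-element scan over all categories by one pass over each category's actual entries,
-- accumulating into two dicts keyed by element (objective: faster).

-- ===== PORT A =====
-- body of A's inner loop 'for j in c.keys(): …' for a fixed element i
def pvStepInner (tag i : String) (di : PySem.Dict String Int) (p : String × List (String × Int)) : PySem.Dict String Int :=
  let cj := PySem.Dict.ofList p.2
  if p.1 == tag then
    if cj.contains i = false then di.insert "x" 0
    else di.insert "x" (cj.getD i 0)       -- guarded by contains: c[j][i] cannot raise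
  else
    if cj.contains i = false then di.insert "y" (di.getD "y" 0 + 0)
    else di.insert "y" (di.getD "y" 0 + cj.getD i 0)

-- body of A's second loop 'for i in sd: …'
def pvStepOuter (c : List (String × List (String × Int))) (tag : String)
    (dt : PySem.Dict String (PySem.Dict String Int)) (i : String) : PySem.Dict String (PySem.Dict String Int) :=
  let di := ((dt.getD i PySem.Dict.empty).insert "x" 0).insert "y" 0
  dt.insert i (c.foldl (pvStepInner tag i) di)

def element_counter (sd : List String) (c : List (String × List (String × Int))) (tag : String) : List (String × List (String × Int)) :=
  -- dt = {}; for i in sd: dt[i] = {}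
  let dt : PySem.Dict String (PySem.Dict String Int) :=
    sd.foldl (fun dt i => dt.insert i PySem.Dict.empty) PySem.Dict.empty
  -- for i in sd: dt[i]["x"] = 0; dt[i]["y"] = 0; for j in c.keys(): …
  let dt := sd.foldl (pvStepOuter c tag) dt
  dt.items.map (fun p => (p.1, p.2.items))

-- ===== PORT B =====
-- 'for i, v in inner.items(): if i in keys: x[i] = v'
def pvStepX (keys : PySem.Set String) (x : PySem.Dict String Int) (iv : String × Int) : PySem.Dict String Int :=
  if PySem.Set.contains keys iv.1 then x.insert iv.1 iv.2 else x

-- 'for i, v in inner.items(): if i in keys: y[i] = y.get(i, 0) + v'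
def pvStepY (keys : PySem.Set String) (y : PySem.Dict String Int) (iv : String × Int) : PySem.Dict String Int :=
  if PySem.Set.contains keys iv.1 then y.insert iv.1 (y.getD iv.1 0 + iv.2) else y

-- body of B's loop 'for j, inner in c.items(): …'
def pvStepB (keys : PySem.Set String) (tag : String)
    (xy : PySem.Dict String Int × PySem.Dict String Int) (p : String × List (String × Int)) :
    PySem.Dict String Int × PySem.Dict String Int :=
  let inner := (PySem.Dict.ofList p.2).items
  if p.1 == tag then (inner.foldl (pvStepX keys) xy.1, xy.2)
  else (xy.1, inner.foldl (pvStepY keys) xy.2)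

def element_counter_alt (sd : List String) (c : List (String × List (String × Int))) (tag : String) : List (String × List (String × Int)) :=
  let keys := PySem.Set.ofList sd
  let xy := c.foldl (pvStepB keys tag) (PySem.Dict.empty, PySem.Dict.empty)
  (PySem.List.dedup sd).map (fun i => (i, [("x", xy.1.getD i 0), ("y", xy.2.getD i 0)]))

-- ===== PRECONDITION & SPEC =====
-- Pre_ excludes only association lists for c whose outer keys repeat: those represent no Python dict,
-- so A (whose parameter c IS a dict) is never called on them.
def Pre_element_counter (sd : List String) (c : List (String × List (String × Int))) (tag : String) : Prop :=
  (c.map Prod.fst).Nodup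

instance (sd : List String) (c : List (String × List (String × Int))) (tag : String) : Decidable (Pre_element_counter sd c tag) := by unfold Pre_element_counter; infer_instance

def pvWitness_element_counter : List String × (List (String × List (String × Int))) × String :=
  (["a", "b"], [("t", [("a", 3)]), ("u", [("b", -2), ("a", 1)])], "t")

def Spec_element_counter (sd : List String) (c : List (String × List (String × Int))) (tag : String) (out : List (String × List (String × Int))) : Prop := out = element_counter_alt sd c tag
instance (sd : List String) (c : List (String × List (String × Int))) (tag : String) (out : List (String × List (String × Int))) : Decidable (Spec_element_counter sd c tag out) := by unfold Spec_element_counter; infer_instance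

-- ===== CLAIM (what is proved, stated in full; the proofs are below) =====
def Claim_equal_element_counter : Prop := ∀ (sd : List String) (c : List (String × List (String × Int))) (tag : String), Dom_element_counter sd c tag → Pre_element_counter sd c tag → Spec_element_counter sd c tag (element_counter sd c tag)

-- ===== LEMMAS AND PROOFS =====

-- value of the "x" slot for element i (A's tag-branch fold, collapsed by getD-default-0)
def pvXAux (c : List (String × List (String × Int))) (tag i : String) (a : Int) : Int :=
  c.foldl (fun a p => if p.1 == tag then (PySem.Dict.ofList p.2).getD i 0 else a) a

-- value of the "y" slot for element i
def pvYAux (c : List (String × List (String × Int))) (tag i : String) (b : Int) : Int :=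
  c.foldl (fun b p => if p.1 == tag then b else b + (PySem.Dict.ofList p.2).getD i 0) b

-- the per-element result dict common to both ports
def pvF (c : List (String × List (String × Int))) (tag i : String) : PySem.Dict String Int :=
  PySem.Dict.mk [("x", pvXAux c tag i 0), ("y", pvYAux c tag i 0)]

theorem pv_innerA (tag i : String) : ∀ (c : List (String × List (String × Int))) (a b : Int),
    List.foldl (pvStepInner tag i) (PySem.Dict.mk [("x", a), ("y", b)]) c
      = PySem.Dict.mk [("x", pvXAux c tag i a), ("y", pvYAux c tag i b)] := by
  intro c
  induction c with
  | nil => intro a b; rfl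
  | cons p rest ih =>
    intro a b
    by_cases h : p.1 = tag
    · by_cases hc : (PySem.Dict.ofList p.2).contains i = false
      · have : pvStepInner tag i (PySem.Dict.mk [("x", a), ("y", b)]) p
            = PySem.Dict.mk [("x", 0), ("y", b)] := by
          simp [pvStepInner, h, hc, PySem.Dict.insert]
        simp only [List.foldl_cons, this, ih]
        have h0 : (PySem.Dict.ofList p.2).getD i 0 = 0 :=
          PySem.Dict.getD_of_not_contains _ _ hc
        simp [pvXAux, pvYAux, h, h0]
      · have : pvStepInner tag i (PySem.Dict.mk [("x", a), ("y", b)]) p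
            = PySem.Dict.mk [("x", (PySem.Dict.ofList p.2).getD i 0), ("y", b)] := by
          simp [pvStepInner, h, hc, PySem.Dict.insert]
        simp only [List.foldl_cons, this, ih]
        simp [pvXAux, pvYAux, h]
    · have hg : (PySem.Dict.mk [("x", a), ("y", b)]).getD "y" 0 = b := by
        simp [PySem.Dict.getD, PySem.Dict.get?]
      by_cases hc : (PySem.Dict.ofList p.2).contains i = false
      · have : pvStepInner tag i (PySem.Dict.mk [("x", a), ("y", b)]) p
            = PySem.Dict.mk [("x", a), ("y", b + 0)] := by
          simp [pvStepInner, h, hc, PySem.Dict.insert, hg]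
        simp only [List.foldl_cons, this, ih]
        have h0 : (PySem.Dict.ofList p.2).getD i 0 = 0 :=
          PySem.Dict.getD_of_not_contains _ _ hc
        simp [pvXAux, pvYAux, h, h0]
      · have : pvStepInner tag i (PySem.Dict.mk [("x", a), ("y", b)]) p
            = PySem.Dict.mk [("x", a), ("y", b + (PySem.Dict.ofList p.2).getD i 0)] := by
          simp [pvStepInner, h, hc, PySem.Dict.insert, hg]
        simp only [List.foldl_cons, this, ih]
        simp [pvXAux, pvYAux, h]

theorem pv_outerA (c : List (String × List (String × Int))) (tag : String) :
    ∀ (l : List String) (dt : PySem.Dict String (PySem.Dict String Int)),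
    dt.keys.Nodup →
    (∀ p ∈ dt.items, p.2 = PySem.Dict.empty ∨ p.2 = pvF c tag p.1) →
    (∀ i ∈ l, dt.contains i = true) →
    (List.foldl (pvStepOuter c tag) dt l).items
      = dt.items.map (fun p => if p.1 ∈ l then (p.1, pvF c tag p.1) else p) := by
  intro l
  induction l with
  | nil => intro dt _ _ _; simp
  | cons i l ih =>
    intro dt hnd hval hcont
    have hc : dt.contains i = true := hcont i (List.mem_cons_self ..)
    have hk : i ∈ dt.keys := (PySem.Dict.contains_iff_mem_keys dt i).1 hc
    obtain ⟨q, hq, hqi⟩ : ∃ q ∈ dt.items, q.1 = i := by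
      simpa [PySem.Dict.keys] using hk
    have hvi : (i, q.2) ∈ dt.items := by rw [← hqi]; exact hq
    have hget : dt.getD i PySem.Dict.empty = q.2 :=
      PySem.Dict.getD_of_mem_items dt hvi hnd _
    have hreset : ((q.2.insert "x" (0 : Int)).insert "y" 0) = PySem.Dict.mk [("x", 0), ("y", 0)] := by
      rcases hval q hq with h1 | h1 <;> rw [h1]
      · decide
      · simp [pvF, PySem.Dict.insert]
    have hstep : pvStepOuter c tag dt i = dt.insert i (pvF c tag i) := by
      show dt.insert i (List.foldl (pvStepInner tag i)
          (((dt.getD i PySem.Dict.empty).insert "x" 0).insert "y" 0) c) = _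
      rw [hget, hreset, pv_innerA]
      rfl
    have hitems' : (dt.insert i (pvF c tag i)).items
        = dt.items.map (fun p => if (p.1 == i) = true then (i, pvF c tag i) else p) :=
      PySem.Dict.items_insert_of_contains dt _ hc
    have hkeys' : (dt.insert i (pvF c tag i)).keys = dt.keys :=
      PySem.Dict.keys_insert_of_contains dt _ hc
    have hnd' : (dt.insert i (pvF c tag i)).keys.Nodup := by rw [hkeys']; exact hnd
    have hval' : ∀ p ∈ (dt.insert i (pvF c tag i)).items,
        p.2 = PySem.Dict.empty ∨ p.2 = pvF c tag p.1 := by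
      intro p hp
      rw [hitems'] at hp
      obtain ⟨q', hq', rfl⟩ := List.mem_map.1 hp
      by_cases hqi' : (q'.1 == i) = true
      · simp [hqi']
      · simp only [hqi', if_false]
        exact hval q' hq'
    have hcont' : ∀ j ∈ l, (dt.insert i (pvF c tag i)).contains j = true := by
      intro j hj
      rw [PySem.Dict.contains_iff_mem_keys, hkeys', ← PySem.Dict.contains_iff_mem_keys]
      exact hcont j (List.mem_cons_of_mem _ hj)
    rw [List.foldl_cons, hstep, ih _ hnd' hval' hcont', hitems', List.map_map]
    apply List.map_congr_left
    intro p hp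
    by_cases hpi : p.1 = i
    · simp [Function.comp, hpi]
    · simp [Function.comp, hpi, List.mem_cons]

theorem pv_dt0 : ∀ (sd ks : List String),
    List.foldl (fun dt i => dt.insert i PySem.Dict.empty)
      (PySem.Dict.mk (ks.map (fun k => (k, (PySem.Dict.empty : PySem.Dict String Int))))) sd
      = PySem.Dict.mk ((PySem.Set.update ks sd).map (fun k => (k, PySem.Dict.empty))) := by
  intro sd
  induction sd with
  | nil => intro ks; rw [PySem.Set.update_nil]; rfl
  | cons i sd ih =>
    intro ks
    have hkeys : (PySem.Dict.mk (ks.map (fun k => (k, (PySem.Dict.empty : PySem.Dict String Int))))).keys = ks := by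
      simp [PySem.Dict.keys_mk, Function.comp_def]
    by_cases hm : i ∈ ks
    · have hc : (PySem.Dict.mk (ks.map (fun k => (k, (PySem.Dict.empty : PySem.Dict String Int))))).contains i = true := by
        rw [PySem.Dict.contains_iff_mem_keys, hkeys]; exact hm
      have hins : (PySem.Dict.mk (ks.map (fun k => (k, (PySem.Dict.empty : PySem.Dict String Int))))).insert i PySem.Dict.empty
          = PySem.Dict.mk (ks.map (fun k => (k, PySem.Dict.empty))) := by
        apply PySem.Dict.ext
        rw [PySem.Dict.items_insert_of_contains _ _ hc]
        show List.map _ (List.map _ ks) = List.map _ ks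
        rw [List.map_map]
        apply List.map_congr_left
        intro k _
        by_cases hk : k = i <;> simp [Function.comp, hk]
      rw [List.foldl_cons, hins, ih ks, PySem.Set.update_cons, PySem.Set.add_of_mem hm]
    · have hc : (PySem.Dict.mk (ks.map (fun k => (k, (PySem.Dict.empty : PySem.Dict String Int))))).contains i = false := by
        rw [← Bool.not_eq_true, PySem.Dict.contains_iff_mem_keys, hkeys]; exact hm
      have hins : (PySem.Dict.mk (ks.map (fun k => (k, (PySem.Dict.empty : PySem.Dict String Int))))).insert i PySem.Dict.empty
          = PySem.Dict.mk ((ks ++ [i]).map (fun k => (k, PySem.Dict.empty))) := by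
        apply PySem.Dict.ext
        rw [PySem.Dict.items_insert_of_not_contains _ _ hc]
        simp
      rw [List.foldl_cons, hins, ih (ks ++ [i]), PySem.Set.update_cons, PySem.Set.add_of_not_mem hm]

theorem pvA_char (sd : List String) (c : List (String × List (String × Int))) (tag : String) :
    element_counter sd c tag
      = (PySem.List.dedup sd).map (fun i => (i, [("x", pvXAux c tag i 0), ("y", pvYAux c tag i 0)])) := by
  show (List.foldl (pvStepOuter c tag)
      (List.foldl (fun dt i => dt.insert i PySem.Dict.empty) PySem.Dict.empty sd) sd).items.map
      (fun p => (p.1, p.2.items)) = _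
  have h0 : List.foldl (fun dt i => dt.insert i PySem.Dict.empty)
        (PySem.Dict.empty : PySem.Dict String (PySem.Dict String Int)) sd
      = PySem.Dict.mk ((PySem.List.dedup sd).map (fun k => (k, PySem.Dict.empty))) := by
    have h1 := pv_dt0 sd []
    rw [PySem.Set.update_nil_left, ← PySem.List.dedup_eq_ofList] at h1
    simpa using h1
  rw [h0]
  have hkeys : (PySem.Dict.mk ((PySem.List.dedup sd).map
        (fun k => (k, (PySem.Dict.empty : PySem.Dict String Int))))).keys = PySem.List.dedup sd := by
    simp [PySem.Dict.keys_mk, Function.comp_def]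
  rw [pv_outerA c tag sd _ ?hnd ?hval ?hcont]
  case hnd => rw [hkeys]; exact PySem.List.nodup_dedup sd
  case hval =>
    intro p hp
    obtain ⟨k, hk, rfl⟩ := List.mem_map.1 hp
    left; rfl
  case hcont =>
    intro j hj
    rw [PySem.Dict.contains_iff_mem_keys, hkeys, PySem.List.mem_dedup]
    exact hj
  show (((PySem.List.dedup sd).map _).map _).map _ = _
  rw [List.map_map, List.map_map]
  apply List.map_congr_left
  intro k hk
  have hks : k ∈ sd := (PySem.List.mem_dedup sd k).1 hk
  simp [Function.comp_def, hks, pvF]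

-- step-unfolding helpers
theorem pv_stepX_pos (keys : PySem.Set String) (x : PySem.Dict String Int) (iv : String × Int)
    (h : PySem.Set.contains keys iv.1 = true) : pvStepX keys x iv = x.insert iv.1 iv.2 := by
  unfold pvStepX; rw [if_pos h]

theorem pv_stepX_neg (keys : PySem.Set String) (x : PySem.Dict String Int) (iv : String × Int)
    (h : ¬ PySem.Set.contains keys iv.1 = true) : pvStepX keys x iv = x := by
  unfold pvStepX; rw [if_neg h]

theorem pv_stepY_pos (keys : PySem.Set String) (y : PySem.Dict String Int) (iv : String × Int)
    (h : PySem.Set.contains keys iv.1 = true) :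
    pvStepY keys y iv = y.insert iv.1 (y.getD iv.1 0 + iv.2) := by
  unfold pvStepY; rw [if_pos h]

theorem pv_stepY_neg (keys : PySem.Set String) (y : PySem.Dict String Int) (iv : String × Int)
    (h : ¬ PySem.Set.contains keys iv.1 = true) : pvStepY keys y iv = y := by
  unfold pvStepY; rw [if_neg h]

-- getD on a literal cons dict
theorem pv_getD_mk_cons (iv : String × Int) (L : List (String × Int)) (i : String) (d0 : Int) :
    (PySem.Dict.mk (iv :: L)).getD i d0
      = if (iv.1 == i) = true then iv.2 else (PySem.Dict.mk L).getD i d0 := by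
  rw [PySem.Dict.getD_eq_get?_getD,
    show (PySem.Dict.mk (iv :: L) : PySem.Dict String Int) = PySem.Dict.mk ((iv.1, iv.2) :: L) from rfl,
    PySem.Dict.get?_mk_cons]
  by_cases hf : (iv.1 == i) = true
  · simp [hf]
  · simp [hf, PySem.Dict.getD_eq_get?_getD]

-- B-side: getD i is preserved by the x-loop when no entry carries key i
theorem pv_xpres (keys : PySem.Set String) (i : String) :
    ∀ (L : List (String × Int)) (x : PySem.Dict String Int),
    (∀ iv ∈ L, iv.1 ≠ i) → (L.foldl (pvStepX keys) x).getD i 0 = x.getD i 0 := by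
  intro L
  induction L with
  | nil => intro x _; rfl
  | cons iv L ih =>
    intro x h
    have hne : iv.1 ≠ i := h iv (List.mem_cons_self ..)
    have hstep : (pvStepX keys x iv).getD i 0 = x.getD i 0 := by
      by_cases hcond : PySem.Set.contains keys iv.1 = true
      · rw [pv_stepX_pos _ _ _ hcond, PySem.Dict.getD_insert_of_ne _ _ _ (Ne.symm hne)]
      · rw [pv_stepX_neg _ _ _ hcond]
    rw [List.foldl_cons, ih _ (fun iv h' => h iv (List.mem_cons_of_mem _ h')), hstep]

-- value of getD i after the x-loop, for i ∈ keys, on a duplicate-free entry list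
theorem pv_xover (keys : PySem.Set String) (i : String) (hc : PySem.Set.contains keys i = true) :
    ∀ (L : List (String × Int)) (x : PySem.Dict String Int), (L.map Prod.fst).Nodup →
    (L.foldl (pvStepX keys) x).getD i 0 = (PySem.Dict.mk L).getD i (x.getD i 0) := by
  intro L
  induction L with
  | nil =>
    intro x _
    simp [PySem.Dict.getD_eq_get?_getD, PySem.Dict.get?]
  | cons iv L ih =>
    intro x hnd
    have hnd' : (L.map Prod.fst).Nodup := (List.nodup_cons.1 hnd).2
    rw [List.foldl_cons, pv_getD_mk_cons]
    by_cases hi : iv.1 = i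
    · have hnotin : ∀ jv ∈ L, jv.1 ≠ i := by
        intro jv hjv hji
        exact (List.nodup_cons.1 hnd).1 (by rw [hi, ← hji]; exact List.mem_map_of_mem hjv)
      have hcond : PySem.Set.contains keys iv.1 = true := by rw [hi]; exact hc
      rw [pv_stepX_pos _ _ _ hcond, pv_xpres keys i L _ hnotin,
        show x.insert iv.1 iv.2 = x.insert i iv.2 by rw [hi],
        PySem.Dict.getD_insert_self, if_pos (show ((iv.1 == i) = true) from by simp [hi])]
    · have hstep : (pvStepX keys x iv).getD i 0 = x.getD i 0 := by
        by_cases hcond : PySem.Set.contains keys iv.1 = true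
        · rw [pv_stepX_pos _ _ _ hcond, PySem.Dict.getD_insert_of_ne _ _ _ (Ne.symm hi)]
        · rw [pv_stepX_neg _ _ _ hcond]
      rw [ih _ hnd', hstep, if_neg (show ¬ ((iv.1 == i) = true) from by simp [hi])]

-- the y-loop adds the matching entries of L to getD i
theorem pv_yadd (keys : PySem.Set String) (i : String) :
    ∀ (L : List (String × Int)) (y : PySem.Dict String Int),
    (L.foldl (pvStepY keys) y).getD i 0
      = y.getD i 0 + (if PySem.Set.contains keys i = true
          then ((L.filter (fun iv => iv.1 == i)).map Prod.snd).sum else 0) := by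
  intro L
  induction L with
  | nil => intro y; simp
  | cons iv L ih =>
    intro y
    rw [List.foldl_cons]
    by_cases hcond : PySem.Set.contains keys iv.1 = true
    · rw [pv_stepY_pos _ _ _ hcond, ih]
      by_cases hi : iv.1 = i
      · have hci : PySem.Set.contains keys i = true := by rw [← hi]; exact hcond
        have hgd : (y.insert iv.1 (y.getD iv.1 0 + iv.2)).getD i 0 = y.getD i 0 + iv.2 := by
          rw [show (y.insert iv.1 (y.getD iv.1 0 + iv.2)) = y.insert i (y.getD i 0 + iv.2) by rw [hi]]
          exact PySem.Dict.getD_insert_self y i _ 0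
        rw [hgd, if_pos hci, if_pos hci, List.filter_cons, if_pos (show ((iv.1 == i) = true) from by simp [hi]),
          List.map_cons, List.sum_cons]
        ring
      · have hgd : (y.insert iv.1 (y.getD iv.1 0 + iv.2)).getD i 0 = y.getD i 0 :=
          PySem.Dict.getD_insert_of_ne _ _ _ (Ne.symm hi)
        rw [hgd, List.filter_cons, if_neg (show ¬ ((iv.1 == i) = true) from by simp [hi])]
    · rw [pv_stepY_neg _ _ _ hcond, ih]
      by_cases hci : PySem.Set.contains keys i = true
      · have hi : iv.1 ≠ i := by
          intro h; rw [h] at hcond; exact hcond hci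
        rw [List.filter_cons, if_neg (show ¬ ((iv.1 == i) = true) from by simp [hi])]
      · rw [if_neg hci, if_neg hci]

-- on a duplicate-free entry list the matching sum is the dict lookup
theorem pv_sumfilt (i : String) :
    ∀ (L : List (String × Int)), (L.map Prod.fst).Nodup →
    ((L.filter (fun iv => iv.1 == i)).map Prod.snd).sum = (PySem.Dict.mk L).getD i 0 := by
  intro L
  induction L with
  | nil => simp [PySem.Dict.getD_eq_get?_getD, PySem.Dict.get?]
  | cons iv L ih =>
    intro hnd
    have hnd' : (L.map Prod.fst).Nodup := (List.nodup_cons.1 hnd).2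
    rw [pv_getD_mk_cons]
    by_cases hi : iv.1 = i
    · have hnotin : (L.filter (fun iv => iv.1 == i)) = [] := by
        rw [List.filter_eq_nil_iff]
        intro jv hjv hj
        exact (List.nodup_cons.1 hnd).1
          (by rw [hi, ← (by simpa using hj : jv.1 = i)]; exact List.mem_map_of_mem hjv)
      rw [List.filter_cons, if_pos (show ((iv.1 == i) = true) from by simp [hi]), List.map_cons, List.sum_cons, hnotin,
        if_pos (show ((iv.1 == i) = true) from by simp [hi])]
      simp
    · rw [List.filter_cons, if_neg (show ¬ ((iv.1 == i) = true) from by simp [hi]), if_neg (show ¬ ((iv.1 == i) = true) from by simp [hi]), ih hnd']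

-- a run of B's loop over categories none of which is the tag leaves x untouched
theorem pv_Bnone_x (keys : PySem.Set String) (tag : String) :
    ∀ (c : List (String × List (String × Int)))
      (xy : PySem.Dict String Int × PySem.Dict String Int),
    (∀ p ∈ c, p.1 ≠ tag) → (c.foldl (pvStepB keys tag) xy).1 = xy.1 := by
  intro c
  induction c with
  | nil => intro xy _; rfl
  | cons p rest ih =>
    intro xy h
    have hne : p.1 ≠ tag := h p (List.mem_cons_self ..)
    rw [List.foldl_cons, ih _ (fun q h' => h q (List.mem_cons_of_mem _ h'))]
    simp [pvStepB, hne]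

theorem pv_XAux_none (tag i : String) :
    ∀ (c : List (String × List (String × Int))) (a : Int),
    (∀ p ∈ c, p.1 ≠ tag) → pvXAux c tag i a = a := by
  intro c
  induction c with
  | nil => intro a _; rfl
  | cons p rest ih =>
    intro a h
    have hne : p.1 ≠ tag := h p (List.mem_cons_self ..)
    simp only [pvXAux, List.foldl_cons]
    rw [show (if (p.1 == tag) = true then (PySem.Dict.ofList p.2).getD i 0 else a) = a by simp [hne]]
    exact ih a (fun q h' => h q (List.mem_cons_of_mem _ h'))

-- x-component of B's fold, for i ∈ keys and duplicate-free category keys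
theorem pv_Bx (keys : PySem.Set String) (tag i : String)
    (hc : PySem.Set.contains keys i = true) :
    ∀ (c : List (String × List (String × Int))), (c.map Prod.fst).Nodup →
    ∀ (y : PySem.Dict String Int),
    ((c.foldl (pvStepB keys tag) (PySem.Dict.empty, y)).1).getD i 0 = pvXAux c tag i 0 := by
  intro c
  induction c with
  | nil => intro _ y; simp [pvXAux, PySem.Dict.getD_empty]
  | cons p rest ih =>
    intro hnd y
    have hnd' : (rest.map Prod.fst).Nodup := (List.nodup_cons.1 hnd).2
    by_cases h : p.1 = tag
    · have hrest : ∀ q ∈ rest, q.1 ≠ tag := by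
        intro q hq hqt
        exact (List.nodup_cons.1 hnd).1 (by rw [h, ← hqt]; exact List.mem_map_of_mem hq)
      rw [List.foldl_cons]
      have hstep : pvStepB keys tag (PySem.Dict.empty, y) p
          = (((PySem.Dict.ofList p.2).items).foldl (pvStepX keys) PySem.Dict.empty, y) := by
        simp [pvStepB, h]
      rw [hstep, pv_Bnone_x keys tag rest _ hrest]
      have hndi : (((PySem.Dict.ofList p.2).items).map Prod.fst).Nodup := by
        have := PySem.Dict.nodup_keys_ofList p.2
        simpa [PySem.Dict.keys] using this
      rw [pv_xover keys i hc _ _ hndi]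
      have hmk : (PySem.Dict.mk ((PySem.Dict.ofList p.2).items)) = PySem.Dict.ofList p.2 := rfl
      rw [hmk, PySem.Dict.getD_empty]
      simp only [pvXAux, List.foldl_cons]
      rw [show (if (p.1 == tag) = true then (PySem.Dict.ofList p.2).getD i 0 else (0:Int))
            = (PySem.Dict.ofList p.2).getD i 0 by simp [h]]
      exact (pv_XAux_none tag i rest _ hrest).symm
    · rw [List.foldl_cons]
      have hstep : pvStepB keys tag (PySem.Dict.empty, y) p
          = (PySem.Dict.empty, ((PySem.Dict.ofList p.2).items).foldl (pvStepY keys) y) := by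
        simp [pvStepB, h]
      rw [hstep, ih hnd' _]
      simp [pvXAux, h]

-- y-component of B's fold, for i ∈ keys
theorem pv_By (keys : PySem.Set String) (tag i : String)
    (hc : PySem.Set.contains keys i = true) :
    ∀ (c : List (String × List (String × Int))) (x y : PySem.Dict String Int),
    ((c.foldl (pvStepB keys tag) (x, y)).2).getD i 0 = pvYAux c tag i (y.getD i 0) := by
  intro c
  induction c with
  | nil => intro x y; simp [pvYAux]
  | cons p rest ih =>
    intro x y
    rw [List.foldl_cons]
    by_cases h : p.1 = tag
    · have hstep : pvStepB keys tag (x, y) p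
          = (((PySem.Dict.ofList p.2).items).foldl (pvStepX keys) x, y) := by
        simp [pvStepB, h]
      rw [hstep, ih _ y]
      simp [pvYAux, h]
    · have hstep : pvStepB keys tag (x, y) p
          = (x, ((PySem.Dict.ofList p.2).items).foldl (pvStepY keys) y) := by
        simp [pvStepB, h]
      have hndi : (((PySem.Dict.ofList p.2).items).map Prod.fst).Nodup := by
        have := PySem.Dict.nodup_keys_ofList p.2
        simpa [PySem.Dict.keys] using this
      rw [hstep, ih x _, pv_yadd keys i _ y, hc, if_pos rfl, pv_sumfilt i _ hndi]
      have hmk : (PySem.Dict.mk ((PySem.Dict.ofList p.2).items)) = PySem.Dict.ofList p.2 := rfl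
      rw [hmk]
      simp [pvYAux, h]

theorem pvB_char (sd : List String) (c : List (String × List (String × Int))) (tag : String)
    (h : (c.map Prod.fst).Nodup) :
    element_counter_alt sd c tag
      = (PySem.List.dedup sd).map (fun i => (i, [("x", pvXAux c tag i 0), ("y", pvYAux c tag i 0)])) := by
  show (PySem.List.dedup sd).map (fun i =>
      (i, [("x", ((c.foldl (pvStepB (PySem.Set.ofList sd) tag) (PySem.Dict.empty, PySem.Dict.empty)).1).getD i 0),
           ("y", ((c.foldl (pvStepB (PySem.Set.ofList sd) tag) (PySem.Dict.empty, PySem.Dict.empty)).2).getD i 0)])) = _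
  apply List.map_congr_left
  intro i hi
  have hmem : i ∈ sd := (PySem.List.mem_dedup sd i).1 hi
  have hc : PySem.Set.contains (PySem.Set.ofList sd) i = true := by
    simp only [PySem.Set.contains]
    simp [PySem.Set.mem_ofList, hmem]
  rw [pv_Bx (PySem.Set.ofList sd) tag i hc c h PySem.Dict.empty,
    pv_By (PySem.Set.ofList sd) tag i hc c PySem.Dict.empty PySem.Dict.empty,
    PySem.Dict.getD_empty]

-- ===== VERDICT (by name: the statement is the Claim_ definition above) =====
theorem element_counter_spec : Claim_equal_element_counter := by
  intro sd c tag _ hpre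
  unfold Spec_element_counter
  rw [pvA_char, pvB_char sd c tag hpre]
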